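-- pv_equiv track=rewrite | github.com/wisoniamir/Genesis-FINAL-TRY | preservation_holding_area/module_discovery_engine_20250621_212800.py | _extract_event_listeners
-- ===== SOURCE A (Python) =====
-- from typing import Dict, Any, List, Optional, Callable
--
-- def _extract_event_listeners(content: str) -> List[str]:
--     """Extract event listeners from source code"""
--     listeners = []
--
--     # Look for event listening patterns
--     listen_patterns = [
--         'subscribe_to_event(',
--         'listen_for(',
--         'on_event(',
--         'handle_signal(',
--         'register_callback('
--     ]
--
--     for pattern in listen_patterns:
--         if pattern in content:
--             # Extract event names being listened to
--             lines = content.split('\n')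
--             for line in lines:
--                 if pattern in line:
--                     if '"' in line:
--                         event_name = line.split('"')[1]
--                         listeners.append(event_name)
--                     elif "'" in line:
--                         event_name = line.split("'")[1]
--                         listeners.append(event_name)
--
--     return list(set(listeners))
-- ===== SOURCE B (Python) =====
-- def _quoted_event_name(line):
--     """First double-quoted (else first single-quoted) token of the line, or None."""
--     if '"' in line:
--         return line.split('"')[1]
--     if "'" in line:
--         return line.split("'")[1]
--     return None
--
--
-- def _extract_event_listeners(content: str):
--     """Extract event listeners from source code"""
--     listen_patterns = [
--         'subscribe_to_event(',
--         'listen_for(',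
--         'on_event(',
--         'handle_signal(',
--         'register_callback('
--     ]
--
--     # patterns that occur in the source at all; then a single pass over the lines
--     active = [p for p in listen_patterns if p in content]
--
--     listeners = []
--     for line in content.split('\n'):
--         if any(p in line for p in active):
--             name = _quoted_event_name(line)
--             if name is not None:
--                 listeners.append(name)
--
--     return list(set(listeners))
-- ===== Notes on version B (the rewrite author's own statement) =====
-- stated objective: simpler
-- what changed: B filters the pattern list against the whole content once, then makes a single pass over the lines (with an any() test per line) instead of A's per-pattern re-split and re-scan of all lines; the quoted-name extraction is factored into a helper and dedup via set is unchanged.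
import Mathlib
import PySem

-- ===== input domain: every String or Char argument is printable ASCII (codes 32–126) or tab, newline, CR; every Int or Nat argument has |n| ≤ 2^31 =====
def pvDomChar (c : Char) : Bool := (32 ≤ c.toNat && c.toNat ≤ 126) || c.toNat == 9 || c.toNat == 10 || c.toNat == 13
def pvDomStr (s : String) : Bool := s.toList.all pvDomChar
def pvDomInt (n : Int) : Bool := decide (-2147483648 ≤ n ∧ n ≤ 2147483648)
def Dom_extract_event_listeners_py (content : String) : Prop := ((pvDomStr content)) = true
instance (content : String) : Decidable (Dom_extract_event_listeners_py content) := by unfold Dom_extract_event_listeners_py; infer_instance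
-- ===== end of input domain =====

-- B replaces A's per-pattern re-scan of all lines by one filter of the pattern list plus a single
-- pass over the lines (objective: simpler). Python's `list(set(listeners))` has unspecified
-- (hash-dependent) order; BOTH ports return the distinct listeners sorted by their character list —
-- one canonical representative of that set (outputs of this function are compared as sets).

-- shared final step of both ports: Python's `list(set(listeners))` (hash-dependent order) is
-- ported as its canonical representative, the distinct elements sorted by character list
def pvListSet (xs : List String) : List String :=
  @PySem.List.sorted String (List Char) List.instLinearOrder.toLT
    (@LinearOrder.toDecidableLT (List Char) List.instLinearOrder)
    (PySem.Set.ofList xs) (fun s => s.toList) false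

-- ===== PORT A =====
-- `line.split('"')[1]` is ported as pyGetD with default "": under the guard `'"' in line` the split
-- has at least two pieces, so index 1 is always in range and the default is never used (exact there).
def extract_event_listeners_py (content : String) : List String :=
  let listen_patterns : List String :=
    ["subscribe_to_event(", "listen_for(", "on_event(", "handle_signal(", "register_callback("]
  let listeners : List String :=
    listen_patterns.foldl (fun listeners pattern =>
      if PySem.Str.isIn pattern content then
        let lines := (PySem.Str.split? content "\n").getD []
        lines.foldl (fun listeners line =>
          if PySem.Str.isIn pattern line then
            if PySem.Str.isIn "\"" line then
              listeners ++ [PySem.List.pyGetD ((PySem.Str.split? line "\"").getD []) 1 ""]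
            else if PySem.Str.isIn "'" line then
              listeners ++ [PySem.List.pyGetD ((PySem.Str.split? line "'").getD []) 1 ""]
            else listeners
          else listeners) listeners
      else listeners) []
  pvListSet listeners

-- ===== PORT B =====
def pvPatterns : List String :=
  ["subscribe_to_event(", "listen_for(", "on_event(", "handle_signal(", "register_callback("]

def pvQuoted (line : String) : Option String :=
  if PySem.Str.isIn "\"" line then
    some (PySem.List.pyGetD ((PySem.Str.split? line "\"").getD []) 1 "")
  else if PySem.Str.isIn "'" line then
    some (PySem.List.pyGetD ((PySem.Str.split? line "'").getD []) 1 "")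
  else none

def extract_event_listeners_py_alt (content : String) : List String :=
  let active := pvPatterns.filter (fun p => PySem.Str.isIn p content)
  let listeners : List String :=
    ((PySem.Str.split? content "\n").getD []).foldl (fun acc line =>
      if active.any (fun p => PySem.Str.isIn p line) then
        match pvQuoted line with
        | some name => acc ++ [name]
        | none => acc
      else acc) []
  pvListSet listeners

-- ===== PRECONDITION & SPEC =====
def Spec_extract_event_listeners_py (content : String) (out : List String) : Prop := out = extract_event_listeners_py_alt content
instance (content : String) (out : List String) : Decidable (Spec_extract_event_listeners_py content out) := by unfold Spec_extract_event_listeners_py; infer_instance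

-- ===== CLAIM (what is proved, stated in full; the proofs are below) =====
def Claim_equal_extract_event_listeners_py : Prop := ∀ (content : String), Dom_extract_event_listeners_py content → Spec_extract_event_listeners_py content (extract_event_listeners_py content)

-- ===== LEMMAS AND PROOFS =====

-- the conditional single-element contribution of one line for one pattern, as A computes it
def pvContribA (pattern line : String) : List String :=
  if PySem.Str.isIn pattern line then (pvQuoted line).toList else []

lemma contribA_mem (pattern line x : String) :
    x ∈ pvContribA pattern line ↔
      PySem.Str.isIn pattern line = true ∧ pvQuoted line = some x := by
  unfold pvContribA
  by_cases hp : PySem.Str.isIn pattern line = true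
  · rw [if_pos hp]
    cases hq : pvQuoted line with
    | none =>
        constructor
        · intro h; simp at h
        · rintro ⟨-, h⟩; cases h
    | some a =>
        simp only [Option.toList_some, List.mem_singleton, Option.some.injEq]
        constructor
        · intro hx; exact ⟨hp, hx.symm⟩
        · rintro ⟨-, h⟩; exact h.symm
  · rw [if_neg hp]
    constructor
    · intro h; simp at h
    · rintro ⟨h1, -⟩; exact (hp h1).elim

-- pvListSet depends only on which strings occur in its argument
lemma pvListSet_eq_of_mem_iff (xs ys : List String) (h : ∀ x, x ∈ xs ↔ x ∈ ys) :
    pvListSet xs = pvListSet ys := by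
  unfold pvListSet
  exact PySem.List.sorted_eq_sorted_of_perm _ _ (fun s => s.toList)
    (fun a b hab => String.ext hab)
    ((List.perm_ext_iff_of_nodup (PySem.Set.nodup_ofList _) (PySem.Set.nodup_ofList _)).2
      (by simp only [PySem.Set.mem_ofList]; exact h))

-- A's inner loop over the lines, for one pattern, in flatMap form
lemma innerA_eq (pattern : String) (lines acc : List String) :
    lines.foldl (fun listeners line =>
        if PySem.Str.isIn pattern line then
          if PySem.Str.isIn "\"" line then
            listeners ++ [PySem.List.pyGetD ((PySem.Str.split? line "\"").getD []) 1 ""]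
          else if PySem.Str.isIn "'" line then
            listeners ++ [PySem.List.pyGetD ((PySem.Str.split? line "'").getD []) 1 ""]
          else listeners
        else listeners) acc
      = acc ++ lines.flatMap (pvContribA pattern) := by
  rw [← PySem.List.foldl_append_eq_flatMap]
  apply PySem.List.foldl_congr_mem
  intro a line _
  unfold pvContribA pvQuoted
  split_ifs <;> simp

-- B's loop over the lines, in flatMap form
lemma loopB_eq (active lines acc : List String) :
    lines.foldl (fun acc line =>
        if active.any (fun p => PySem.Str.isIn p line) then
          match pvQuoted line with
          | some name => acc ++ [name]
          | none => acc
        else acc) acc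
      = acc ++ lines.flatMap (fun line =>
          if active.any (fun p => PySem.Str.isIn p line) then (pvQuoted line).toList else []) := by
  rw [← PySem.List.foldl_append_eq_flatMap]
  apply PySem.List.foldl_congr_mem
  intro a line _
  cases pvQuoted line <;> split_ifs <;> simp

-- the raw listener lists of A and B hold the same strings
lemma raw_mem_iff (content x : String) :
    (x ∈ (["subscribe_to_event(", "listen_for(", "on_event(", "handle_signal(",
           "register_callback("] : List String).foldl (fun listeners pattern =>
        if PySem.Str.isIn pattern content then
          ((PySem.Str.split? content "\n").getD []).foldl (fun listeners line =>
            if PySem.Str.isIn pattern line then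
              if PySem.Str.isIn "\"" line then
                listeners ++ [PySem.List.pyGetD ((PySem.Str.split? line "\"").getD []) 1 ""]
              else if PySem.Str.isIn "'" line then
                listeners ++ [PySem.List.pyGetD ((PySem.Str.split? line "'").getD []) 1 ""]
              else listeners
            else listeners) listeners
        else listeners) [])
    ↔ (x ∈ ((PySem.Str.split? content "\n").getD []).foldl (fun acc line =>
        if (pvPatterns.filter (fun p => PySem.Str.isIn p content)).any
             (fun p => PySem.Str.isIn p line) then
          match pvQuoted line with
          | some name => acc ++ [name]
          | none => acc
        else acc) []) := by
  rw [loopB_eq]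
  have houter :
      (["subscribe_to_event(", "listen_for(", "on_event(", "handle_signal(",
        "register_callback("] : List String).foldl (fun listeners pattern =>
          if PySem.Str.isIn pattern content then
            ((PySem.Str.split? content "\n").getD []).foldl (fun listeners line =>
              if PySem.Str.isIn pattern line then
                if PySem.Str.isIn "\"" line then
                  listeners ++ [PySem.List.pyGetD ((PySem.Str.split? line "\"").getD []) 1 ""]
                else if PySem.Str.isIn "'" line then
                  listeners ++ [PySem.List.pyGetD ((PySem.Str.split? line "'").getD []) 1 ""]
                else listeners
              else listeners) listeners
          else listeners) []
        = pvPatterns.flatMap (fun pattern =>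
            if PySem.Str.isIn pattern content then
              ((PySem.Str.split? content "\n").getD []).flatMap (pvContribA pattern)
            else []) := by
    unfold pvPatterns
    calc _ = (["subscribe_to_event(", "listen_for(", "on_event(", "handle_signal(",
               "register_callback("] : List String).foldl (fun listeners pattern =>
                 listeners ++ (if PySem.Str.isIn pattern content then
                   ((PySem.Str.split? content "\n").getD []).flatMap (pvContribA pattern)
                 else [])) [] := by
              apply PySem.List.foldl_congr_mem
              intro a pattern _
              split_ifs with h
              · exact innerA_eq pattern _ a
              · exact (List.append_nil a).symm
      _ = _ := by
              rw [PySem.List.foldl_append_eq_flatMap, List.nil_append]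
  rw [houter]
  simp only [List.nil_append, List.mem_flatMap]
  constructor
  · rintro ⟨p, hp, hmem⟩
    by_cases hc : PySem.Str.isIn p content = true
    · rw [if_pos hc] at hmem
      rcases List.mem_flatMap.1 hmem with ⟨line, hline, hx⟩
      rcases (contribA_mem p line x).1 hx with ⟨hpl, hq⟩
      refine ⟨line, hline, ?_⟩
      rw [if_pos (List.any_eq_true.2 ⟨p, List.mem_filter.2 ⟨hp, by simpa using hc⟩, hpl⟩)]
      simp [hq]
    · rw [if_neg hc] at hmem
      exact absurd hmem (List.not_mem_nil)
  · rintro ⟨line, hline, hmem⟩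
    by_cases hc : (pvPatterns.filter (fun p => PySem.Str.isIn p content)).any
        (fun p => PySem.Str.isIn p line) = true
    · rw [if_pos hc] at hmem
      rcases List.any_eq_true.1 hc with ⟨p, hpf, hpl⟩
      rcases List.mem_filter.1 hpf with ⟨hp, hpc⟩
      refine ⟨p, hp, ?_⟩
      rw [if_pos (by simpa using hpc)]
      exact List.mem_flatMap.2 ⟨line, hline, (contribA_mem p line x).2 ⟨hpl, by simpa using hmem⟩⟩
    · rw [if_neg hc] at hmem
      exact absurd hmem (List.not_mem_nil)

-- ===== VERDICT (by name: the statement is the Claim_ definition above) =====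
theorem extract_event_listeners_py_spec : Claim_equal_extract_event_listeners_py := by
  intro content _
  unfold Spec_extract_event_listeners_py extract_event_listeners_py extract_event_listeners_py_alt
  dsimp only
  exact pvListSet_eq_of_mem_iff _ _ (fun x => raw_mem_iff content x)
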